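-- pv_equiv track=rewrite | github.com/NightFurySL2001/SVG2FontBuilder | newfontbuild.py | checkDuplicateName
-- ===== SOURCE A (Python) =====
-- def checkDuplicateName(name, list):
--     """
--     Check for same name in list and if so, return a new name that is not in the list by appending a number
--     """
--     if name not in list:
--         return name
--     i = 0
--     tempname = name
--     while tempname in list:
--         i += 1
--         tempname = name + "." + str(i)
--     return tempname
-- ===== SOURCE B (Python) =====
-- def checkDuplicateName(name, list):
--     """
--     Check for same name in list and if so, return a new name that is not in the list by appending a number
--     """
--     if name not in list:
--         return name
--     prefix = name + "."
--     nums = []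
--     for entry in list:
--         if entry.startswith(prefix):
--             v = _suffix_number(entry[len(prefix):])
--             if v is not None:
--                 nums.append(v)
--     expect = 1
--     for v in sorted(set(nums)):
--         if v == expect:
--             expect += 1
--         elif v > expect:
--             break
--     return prefix + str(expect)
--
--
-- def _suffix_number(rest):
--     """The positive integer v with str(v) == rest, or None."""
--     if not rest.isdigit() or rest[0] == "0":
--         return None
--     v = 0
--     for ch in rest:
--         v = 10 * v + (ord(ch) - 48)
--     return v
-- ===== Notes on version B (the rewrite author's own statement) =====
-- stated objective: alternative
-- what changed: A repeatedly builds candidate names and scans the list for each; B instead makes one pass parsing each entry's canonical numeric suffix after name+'.' into an integer, then finds the first free number by a gap scan over the sorted set of those integers (no candidate strings are tested for membership).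
import Mathlib
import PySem

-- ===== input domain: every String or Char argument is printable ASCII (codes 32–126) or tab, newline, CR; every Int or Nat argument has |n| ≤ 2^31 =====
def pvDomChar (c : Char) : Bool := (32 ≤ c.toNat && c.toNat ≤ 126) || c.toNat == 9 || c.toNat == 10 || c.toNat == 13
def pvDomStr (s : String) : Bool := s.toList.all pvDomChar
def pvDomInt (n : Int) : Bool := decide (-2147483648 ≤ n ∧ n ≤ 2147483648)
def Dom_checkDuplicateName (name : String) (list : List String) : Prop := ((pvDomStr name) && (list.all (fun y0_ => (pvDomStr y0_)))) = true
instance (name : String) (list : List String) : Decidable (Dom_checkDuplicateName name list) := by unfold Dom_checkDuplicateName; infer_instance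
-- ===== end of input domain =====

-- B replaces A's trial loop (build candidate, scan the list, repeat) by: one pass parsing the
-- canonical numeric suffixes after name+"." into integers, then a gap scan over the sorted set
-- of those integers to find the first free number — an alternative of similar cost.

-- ===== PORT A =====
-- A's while loop, fueled; fuel list.length + 2 is never exhausted: the loop frees a candidate
-- after at most list.length + 1 true tests (the candidates are pairwise distinct strings).
def pvALoop (name : String) (list : List String) : Nat → Int → String → String
  | 0, _, temp => temp
  | f + 1, i, temp =>
    if list.contains temp then
      pvALoop name list f (i + 1) (name ++ "." ++ PySem.Int.toStr (i + 1))
    else temp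

def checkDuplicateName (name : String) (list : List String) : String :=
  if ¬ list.contains name then name
  else pvALoop name list (list.length + 2) 0 name

-- ===== PORT B =====
-- Source B's _suffix_number: the positive integer v with str(v) == rest, or none
-- (non-empty, all digits, no leading zero; the loop is v = 10*v + (ord(ch) - 48)).
def pvSuffixNumber (rest : String) : Option Int :=
  if !(PySem.Str.strIsdigit rest) || (PySem.Str.pyGet? rest 0 == some '0') then none
  else some (rest.toList.foldl (fun a c => 10 * a + ((c.toNat : Int) - 48)) 0)

-- Source B's for-loop over sorted(set(nums)) with its break
def pvGap : List Int → Int → Int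
  | [], expect => expect
  | v :: vs, expect =>
    if v = expect then pvGap vs (expect + 1)
    else if expect < v then expect
    else pvGap vs expect

def checkDuplicateName_alt (name : String) (list : List String) : String :=
  if ¬ list.contains name then name
  else
    let pfx := name ++ "."
    let nums : List Int := list.foldl
      (fun acc entry =>
        if PySem.Str.startswith entry pfx then
          match pvSuffixNumber (PySem.Str.slice entry (some (PySem.Str.len pfx)) none) with
          | some w => acc ++ [w]
          | none => acc
        else acc) []
    pfx ++ PySem.Int.toStr (pvGap (PySem.List.sorted (PySem.Set.ofList nums) (fun x => x) false) 1)

-- ===== PRECONDITION & SPEC =====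
def Spec_checkDuplicateName (name : String) (list : List String) (out : String) : Prop := out = checkDuplicateName_alt name list
instance (name : String) (list : List String) (out : String) : Decidable (Spec_checkDuplicateName name list out) := by unfold Spec_checkDuplicateName; infer_instance

-- ===== CLAIM (what is proved, stated in full; the proofs are below) =====
def Claim_equal_checkDuplicateName : Prop := ∀ (name : String) (list : List String), Dom_checkDuplicateName name list → Spec_checkDuplicateName name list (checkDuplicateName name list)

-- ===== LEMMAS AND PROOFS =====

-- e = p ++ t exactly when e starts with p and its tail after |p| characters is t.
lemma pv_decomp (p t e : String) :
    e = p ++ t ↔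
      (PySem.Str.startswith e p = true ∧
       PySem.Str.slice e (some (PySem.Str.len p)) none = t) := by
  rw [← String.toList_inj, String.toList_append, ← String.toList_inj,
      PySem.Str.toList_slice, PySem.Str.startswith_eq, PySem.Chars.startswith_iff,
      PySem.Str.len_eq, PySem.Chars.slice_eq_listSlice, PySem.List.slice_from_natCast]
  constructor
  · intro h
    exact ⟨⟨t.toList, h.symm⟩, by rw [h]; simp⟩
  · rintro ⟨hpre, hdrop⟩
    rw [← List.prefix_iff_eq_append.mp hpre, hdrop]

-- decimal digit characters
lemma pv_digitChar_toNat (d : Nat) (h : d < 10) : (Nat.digitChar d).toNat = d + 48 := by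
  interval_cases d <;> decide

lemma pv_isdigit_digitChar (d : Nat) (h : d < 10) : PySem.Chars.isdigit (Nat.digitChar d) = true := by
  interval_cases d <;> decide

lemma pv_digitChar_ne_zeroChar (d : Nat) (h0 : d ≠ 0) (h : d < 10) : Nat.digitChar d ≠ '0' := by
  interval_cases d
  · exact absurd rfl h0
  all_goals decide

lemma pv_digitChar_cancel (c : Char) (h : PySem.Chars.isdigit c = true) :
    Nat.digitChar (c.toNat - 48) = c := by
  have hv : 48 ≤ c.toNat ∧ c.toNat ≤ 57 := by
    simp only [PySem.Chars.isdigit, Bool.and_eq_true, decide_eq_true_eq, Char.le_def] at h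
    exact ⟨h.1, h.2⟩
  have hc : Char.ofNat c.toNat = c := Char.ofNat_toNat c
  rw [← hc]
  generalize c.toNat = n at hv ⊢
  obtain ⟨h1, h2⟩ := hv
  interval_cases n <;> decide

lemma pv_isdigit_bounds (c : Char) (h : PySem.Chars.isdigit c = true) :
    48 ≤ c.toNat ∧ c.toNat ≤ 57 := by
  simp only [PySem.Chars.isdigit, Bool.and_eq_true, decide_eq_true_eq, Char.le_def] at h
  exact ⟨h.1, h.2⟩

-- Nat.toDigits prints the reversed base-10 digit list
lemma pv_tdc (f : Nat) : ∀ (n : Nat) (acc : List Char), 0 < n → n < f →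
    Nat.toDigitsCore 10 f n acc = ((Nat.digits 10 n).map Nat.digitChar).reverse ++ acc := by
  induction f with
  | zero => intro n acc h1 h2; omega
  | succ f ih =>
    intro n acc h1 h2
    rw [Nat.toDigitsCore]
    by_cases hd : n / 10 = 0
    · have hn : n < 10 := by omega
      rw [if_pos hd, Nat.digits_def' (by norm_num) h1, hd, Nat.digits_zero]
      simp [Nat.mod_eq_of_lt hn]
    · rw [if_neg hd, ih (n / 10) _ (by omega) (by omega),
        Nat.digits_def' (by norm_num : (1:Nat) < 10) h1]
      simp

lemma pv_toDigits (n : Nat) (h : 0 < n) :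
    Nat.toDigits 10 n = ((Nat.digits 10 n).map Nat.digitChar).reverse := by
  rw [Nat.toDigits, pv_tdc (n + 1) n [] h (by omega)]; simp

lemma pv_toStr_toList (v : Int) (h : 1 ≤ v) :
    (PySem.Int.toStr v).toList = ((Nat.digits 10 v.toNat).map Nat.digitChar).reverse := by
  rw [PySem.Int.toList_toStr, PySem.Int.toChars, if_neg (by omega),
    pv_toDigits v.toNat (by omega)]

-- value of B's fold over a printed digit list
lemma pv_val (L : List Nat) (h : ∀ d ∈ L, d < 10) :
    ((L.map Nat.digitChar).reverse).foldl (fun a c => 10 * a + ((c.toNat : Int) - 48)) 0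
      = ((Nat.ofDigits 10 L : Nat) : Int) := by
  rw [List.foldl_reverse]
  induction L with
  | nil => simp [Nat.ofDigits]
  | cons d tl ih =>
    have hd : d < 10 := h d (by simp)
    rw [List.map_cons, List.foldr_cons, ih (fun x hx => h x (by simp [hx])),
      Nat.ofDigits_cons, pv_digitChar_toNat d hd]
    push_cast
    ring

lemma pv_pyGet0 (s : String) : PySem.Str.pyGet? s 0 = s.toList.head? := by
  rw [show (0 : Int) = ((0 : Nat) : Int) from rfl, PySem.Str.pyGet?_natCast]
  exact List.head?_eq_getElem?.symm

-- parsing the canonical decimal of a positive integer succeeds with that integer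
lemma pv_parse_toStr (v : Int) (h : 1 ≤ v) :
    pvSuffixNumber (PySem.Int.toStr v) = some v := by
  have hne : Nat.digits 10 v.toNat ≠ [] := by
    rw [Nat.digits_ne_nil_iff_ne_zero]; omega
  have hlt : ∀ d ∈ Nat.digits 10 v.toNat, d < 10 :=
    fun d hd => Nat.digits_lt_base (by norm_num) hd
  have hlist := pv_toStr_toList v h
  have hlistC : PySem.Int.toChars v = ((Nat.digits 10 v.toNat).map Nat.digitChar).reverse := by
    rw [← PySem.Int.toList_toStr]; exact hlist
  have hdigC : PySem.Chars.strIsdigit (PySem.Int.toChars v) = true := by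
    rw [hlistC, PySem.Chars.strIsdigit]
    simp only [Bool.and_eq_true, List.all_eq_true, List.mem_reverse, List.mem_map]
    refine ⟨by simp [hne], ?_⟩
    rintro c ⟨d, hd, rfl⟩
    exact pv_isdigit_digitChar d (hlt d hd)
  have hdig : PySem.Str.strIsdigit (PySem.Int.toStr v) = true := by
    rw [PySem.Str.strIsdigit_eq, PySem.Int.toList_toStr]; exact hdigC
  have hhead : (PySem.Int.toStr v).toList.head? ≠ some '0' := by
    rw [hlist, List.head?_reverse, List.getLast?_map,
      List.getLast?_eq_some_getLast hne]
    intro hcon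
    simp only [Option.map_some, Option.some.injEq] at hcon
    exact pv_digitChar_ne_zeroChar _ (Nat.getLast_digit_ne_zero 10 (by omega))
      (hlt _ (List.getLast_mem hne)) hcon
  have hcond : (!(PySem.Str.strIsdigit (PySem.Int.toStr v))
      || (PySem.Str.pyGet? (PySem.Int.toStr v) 0 == some '0')) = false := by
    rw [hdig, pv_pyGet0]
    simp only [Bool.not_true, Bool.false_or, beq_eq_false_iff_ne, ne_eq]
    exact hhead
  rw [pvSuffixNumber, if_neg (by rw [hcond]; exact Bool.false_ne_true), hlist,
    pv_val _ hlt, Nat.ofDigits_digits]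
  congr 1
  exact Int.toNat_of_nonneg (by omega)

-- a successful parse yields a positive integer whose printed form is the input
lemma pv_parse_sound (s : String) (v : Int) (h : pvSuffixNumber s = some v) :
    1 ≤ v ∧ PySem.Int.toStr v = s := by
  rw [pvSuffixNumber] at h
  split at h
  · exact absurd h (by simp)
  · rename_i hcond
    simp only [Bool.or_eq_true, Bool.not_eq_true', beq_iff_eq, not_or, pv_pyGet0,
      Bool.not_eq_false] at hcond
    obtain ⟨hdig, hhead⟩ := hcond
    rw [PySem.Str.strIsdigit_eq, PySem.Chars.strIsdigit, Bool.and_eq_true,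
      List.all_eq_true] at hdig
    obtain ⟨hne', hall⟩ := hdig
    have hne : s.toList ≠ [] := by simpa using hne'
    have hLlt : ∀ d ∈ (s.toList.map (fun c => c.toNat - 48)).reverse, d < 10 := by
      intro d hd
      rw [List.mem_reverse, List.mem_map] at hd
      obtain ⟨c, hc, rfl⟩ := hd
      have := pv_isdigit_bounds c (hall c hc)
      omega
    have hback : ((((s.toList.map (fun c => c.toNat - 48)).reverse).map Nat.digitChar).reverse)
        = s.toList := by
      rw [List.map_reverse, List.reverse_reverse, List.map_map]
      conv_rhs => rw [← List.map_id s.toList]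
      exact List.map_congr_left (fun c hc => pv_digitChar_cancel c (hall c hc))
    have hLne : (s.toList.map (fun c => c.toNat - 48)).reverse ≠ [] := by simp [hne]
    have hlq : ((s.toList.map (fun c => c.toNat - 48)).reverse).getLast?
        = (s.toList.head?).map (fun c => c.toNat - 48) := by
      rw [List.getLast?_reverse, List.head?_map]
    have hlast : ∀ (hh : (s.toList.map (fun c => c.toNat - 48)).reverse ≠ []),
        ((s.toList.map (fun c => c.toNat - 48)).reverse).getLast hh ≠ 0 := by
      intro hh hcon
      have h1 := List.getLast?_eq_some_getLast hh
      rw [hcon, hlq] at h1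
      cases hx : s.toList.head? with
      | none => rw [hx] at h1; simp at h1
      | some c =>
        rw [hx] at h1
        simp only [Option.map_some, Option.some.injEq] at h1
        have hcmem : c ∈ s.toList := List.mem_of_mem_head? hx
        have hb := pv_isdigit_bounds c (hall c hcmem)
        have hc48 : c.toNat = 48 := by omega
        have hcancel := pv_digitChar_cancel c (hall c hcmem)
        rw [hc48] at hcancel
        have : c = '0' := by simpa using hcancel.symm
        rw [this] at hx
        exact hhead hx
    have hdig_of : Nat.digits 10 (Nat.ofDigits 10 ((s.toList.map (fun c => c.toNat - 48)).reverse))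
        = (s.toList.map (fun c => c.toNat - 48)).reverse :=
      Nat.digits_ofDigits 10 (by norm_num) _ hLlt hlast
    have hfold := pv_val ((s.toList.map (fun c => c.toNat - 48)).reverse) hLlt
    rw [hback] at hfold
    have hveq : v = ((Nat.ofDigits 10 ((s.toList.map (fun c => c.toNat - 48)).reverse) : Nat) : Int) := by
      rw [← hfold]
      exact (Option.some.inj h).symm
    have hpos : Nat.ofDigits 10 ((s.toList.map (fun c => c.toNat - 48)).reverse) ≠ 0 := by
      intro hcon
      rw [hcon, Nat.digits_zero] at hdig_of
      exact hLne hdig_of.symm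
    have hv1 : 1 ≤ v := by
      rw [hveq]; exact_mod_cast Nat.one_le_iff_ne_zero.mpr hpos
    refine ⟨hv1, ?_⟩
    rw [← String.toList_inj, pv_toStr_toList v hv1]
    have hvN : v.toNat = Nat.ofDigits 10 ((s.toList.map (fun c => c.toNat - 48)).reverse) := by
      rw [hveq]; simp
    rw [hvN, hdig_of, hback]

-- membership in B's parsed-suffix list: exactly the positive v with name+"."+str(v) in the list
lemma pv_mem_nums (p : String) : ∀ (list : List String) (acc : List Int) (v : Int),
    v ∈ list.foldl
      (fun acc entry =>
        if PySem.Str.startswith entry p then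
          match pvSuffixNumber (PySem.Str.slice entry (some (PySem.Str.len p)) none) with
          | some w => acc ++ [w]
          | none => acc
        else acc) acc
    ↔ v ∈ acc ∨ (1 ≤ v ∧ (p ++ PySem.Int.toStr v) ∈ list) := by
  intro list
  induction list with
  | nil => simp
  | cons e l ih =>
    intro acc v
    rw [List.foldl_cons, List.mem_cons]
    by_cases hs : PySem.Str.startswith e p = true
    · rw [if_pos hs]
      cases hp : pvSuffixNumber (PySem.Str.slice e (some (PySem.Str.len p)) none) with
      | some w =>
        rw [ih]
        have hkey : v = w ↔ (1 ≤ v ∧ p ++ PySem.Int.toStr v = e) := by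
          constructor
          · rintro rfl
            obtain ⟨hw1, hw2⟩ := pv_parse_sound _ _ hp
            refine ⟨hw1, ?_⟩
            have he : e = p ++ PySem.Str.slice e (some (PySem.Str.len p)) none :=
              (pv_decomp p _ e).mpr ⟨hs, rfl⟩
            rw [hw2, ← he]
          · rintro ⟨hv1, hv2⟩
            have hd := (pv_decomp p (PySem.Int.toStr v) e).mp hv2.symm
            have hparse := pv_parse_toStr v hv1
            rw [← hd.2] at hparse
            exact (Option.some.inj (hp.symm.trans hparse)).symm
        simp only [List.mem_append, List.mem_singleton]
        constructor
        · rintro ((hv | hv) | hv)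
          · exact Or.inl hv
          · exact Or.inr ⟨(hkey.mp hv).1, Or.inl (hkey.mp hv).2⟩
          · exact Or.inr ⟨hv.1, Or.inr hv.2⟩
        · rintro (hv | ⟨hv1, hv2 | hv2⟩)
          · exact Or.inl (Or.inl hv)
          · exact Or.inl (Or.inr (hkey.mpr ⟨hv1, hv2⟩))
          · exact Or.inr ⟨hv1, hv2⟩
      | none =>
        rw [ih]
        constructor
        · rintro (hv | hv)
          · exact Or.inl hv
          · exact Or.inr ⟨hv.1, Or.inr hv.2⟩
        · rintro (hv | ⟨hv1, hv2 | hv2⟩)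
          · exact Or.inl hv
          · exfalso
            have hd := (pv_decomp p (PySem.Int.toStr v) e).mp hv2.symm
            have hparse := pv_parse_toStr v hv1
            rw [← hd.2] at hparse
            rw [hp] at hparse
            exact Option.some_ne_none v hparse.symm
          · exact Or.inr ⟨hv1, hv2⟩
    · rw [if_neg hs, ih]
      constructor
      · rintro (hv | hv)
        · exact Or.inl hv
        · exact Or.inr ⟨hv.1, Or.inr hv.2⟩
      · rintro (hv | ⟨hv1, hv2 | hv2⟩)
        · exact Or.inl hv
        · exact absurd ((pv_decomp p (PySem.Int.toStr v) e).mp hv2.symm).1 hs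
        · exact Or.inr ⟨hv1, hv2⟩

-- the abstract first-free scan both loops compute
def pvMex (u : Int → Bool) : Nat → Int → Int
  | 0, i => i
  | f + 1, i => if u i then pvMex u f (i + 1) else i

lemma pv_lockstep (name : String) (list : List String) :
    ∀ (f : Nat) (i : Int),
      pvALoop name list f i (name ++ "." ++ PySem.Int.toStr i) =
        name ++ "." ++ PySem.Int.toStr
          (pvMex (fun j => list.contains (name ++ "." ++ PySem.Int.toStr j)) f i) := by
  intro f
  induction f with
  | zero => intro i; rfl
  | succ f ih =>
    intro i
    rw [pvALoop, pvMex]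
    split
    · exact ih (i + 1)
    · rfl

lemma pv_mex_congr (u u' : Int → Bool) : ∀ (f : Nat) (k : Int),
    (∀ i, k ≤ i → u i = u' i) → pvMex u f k = pvMex u' f k := by
  intro f
  induction f with
  | zero => intro k _; rfl
  | succ f ih =>
    intro k hag
    rw [pvMex, pvMex, hag k le_rfl]
    split
    · exact ih (k + 1) (fun i hi => hag i (by omega))
    · rfl

lemma pv_gap_eq_mex : ∀ (L : List Int) (f : Nat) (k : Int),
    L.Pairwise (· < ·) → L.length < f →
    pvGap L k = pvMex (fun i => decide (i ∈ L)) f k := by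
  intro L
  induction L with
  | nil =>
    intro f k _ hf
    obtain ⟨f', rfl⟩ : ∃ f', f = f' + 1 := ⟨f - 1, by omega⟩
    rw [pvGap, pvMex, if_neg (by simp)]
  | cons v vs ih =>
    intro f k hpw hf
    obtain ⟨f', rfl⟩ : ∃ f', f = f' + 1 := ⟨f - 1, by omega⟩
    have hpwtail := (List.pairwise_cons.mp hpw).2
    have hvall := (List.pairwise_cons.mp hpw).1
    rcases lt_trichotomy v k with hv | hv | hv
    · -- v < k: skipped on both sides
      rw [pvGap, if_neg (by omega), if_neg (by omega)]
      rw [ih (f' + 1) k hpwtail (by simp at hf ⊢; omega)]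
      apply pv_mex_congr
      intro i hi
      simp only [decide_eq_decide, List.mem_cons]
      constructor
      · exact Or.inr
      · rintro (heq | hm)
        · exfalso; omega
        · exact hm
    · -- v = k: both step to k+1
      subst hv
      rw [pvGap, if_pos rfl, pvMex, if_pos (by simp)]
      rw [ih f' (v + 1) hpwtail (by simpa using hf)]
      apply pv_mex_congr
      intro i hi
      simp only [decide_eq_decide, List.mem_cons]
      constructor
      · exact Or.inr
      · rintro (heq | hm)
        · exfalso; omega
        · exact hm
    · -- k < v: k is free, both return k
      rw [pvGap, if_neg (by omega), if_pos hv, pvMex, if_neg (by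
        simp only [decide_eq_true_eq, List.mem_cons, not_or]
        exact ⟨by omega, fun hm => by have := hvall k hm; omega⟩)]

lemma pv_foldl_len (p : String) : ∀ (list : List String) (acc : List Int),
    (list.foldl
      (fun acc entry =>
        if PySem.Str.startswith entry p then
          match pvSuffixNumber (PySem.Str.slice entry (some (PySem.Str.len p)) none) with
          | some w => acc ++ [w]
          | none => acc
        else acc) acc).length ≤ acc.length + list.length := by
  intro list
  induction list with
  | nil => simp
  | cons e l ih =>
    intro acc
    rw [List.foldl_cons]
    have hstep : (if PySem.Str.startswith e p then
          match pvSuffixNumber (PySem.Str.slice e (some (PySem.Str.len p)) none) with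
          | some w => acc ++ [w]
          | none => acc
        else acc).length ≤ acc.length + 1 := by
      split
      · split <;> simp
      · simp
    calc _ ≤ _ := ih _
      _ ≤ acc.length + (e :: l).length := by simp at hstep ⊢; omega

lemma pv_ofList_len {α : Type} [BEq α] : ∀ (xs : List α) (s : PySem.Set α),
    (xs.foldl PySem.Set.add s).length ≤ s.length + xs.length := by
  intro xs
  induction xs with
  | nil => simp
  | cons x l ih =>
    intro s
    rw [List.foldl_cons]
    have : (PySem.Set.add s x).length ≤ s.length + 1 := by
      rw [PySem.Set.add]; split <;> simp
    calc _ ≤ _ := ih _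
      _ ≤ s.length + (x :: l).length := by simp at this ⊢; omega

theorem pv_main (name : String) (list : List String) :
    checkDuplicateName name list = checkDuplicateName_alt name list := by
  unfold checkDuplicateName checkDuplicateName_alt
  by_cases h : list.contains name
  · rw [if_neg (by simpa using h), if_neg (by simpa using h)]
    dsimp only
    set nums : List Int := list.foldl
      (fun acc entry =>
        if PySem.Str.startswith entry (name ++ ".") then
          match pvSuffixNumber (PySem.Str.slice entry (some (PySem.Str.len (name ++ "."))) none) with
          | some w => acc ++ [w]
          | none => acc
        else acc) [] with hnums
    set L : List Int := PySem.List.sorted (PySem.Set.ofList nums) (fun x => x) false with hLdef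
    -- A's loop: one unfolding, then the lockstep with pvMex
    have hA : pvALoop name list (list.length + 2) 0 name =
        name ++ "." ++ PySem.Int.toStr
          (pvMex (fun j => list.contains (name ++ "." ++ PySem.Int.toStr j)) (list.length + 1) 1) := by
      rw [pvALoop, if_pos h, show (0 : Int) + 1 = 1 from by decide]
      exact pv_lockstep name list (list.length + 1) 1
    rw [hA]
    -- B's gap scan equals the same pvMex
    have hlen : L.length < list.length + 1 := by
      rw [hLdef, PySem.List.length_sorted]
      have h1 := pv_ofList_len nums ([] : PySem.Set Int)
      have h2 := pv_foldl_len (name ++ ".") list []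
      rw [← hnums] at h2
      rw [PySem.Set.ofList_eq_foldl]
      simp only [List.length_nil, Nat.zero_add] at h1 h2 ⊢
      omega
    have hmemL : ∀ i : Int, 1 ≤ i →
        decide (i ∈ L) = list.contains (name ++ "." ++ PySem.Int.toStr i) := by
      intro i hi
      rw [Bool.eq_iff_iff, decide_eq_true_eq, List.contains_iff_mem]
      rw [hLdef, PySem.List.mem_sorted, PySem.Set.mem_ofList, hnums,
        pv_mem_nums (name ++ ".") list [] i]
      rw [String.append_assoc]
      simp [hi]
    have hB : pvGap L 1 =
        pvMex (fun j => list.contains (name ++ "." ++ PySem.Int.toStr j)) (list.length + 1) 1 := by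
      rw [pv_gap_eq_mex L (list.length + 1) 1
        (by rw [hLdef]; exact PySem.List.sorted_ofList_pairwise_lt nums) hlen]
      exact pv_mex_congr _ _ (list.length + 1) 1 (fun i hi => hmemL i hi)
    rw [← hB]
  · rw [if_pos (by simpa using h), if_pos (by simpa using h)]

-- ===== VERDICT (by name: the statement is the Claim_ definition above) =====
theorem checkDuplicateName_spec : Claim_equal_checkDuplicateName := by
  intro name list _
  unfold Spec_checkDuplicateName
  exact pv_main name list
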